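-- pv_equiv track=rewrite | github.com/ThadeNorigar/Alphina-Static | scripts/check-zeitleiste.py | doy_to_label
-- ===== SOURCE A (Python) =====
-- def doy_to_label(doy):
--     months = ["Eis", "Schnee", "Lenz", "Saat", "Bluet", "Sonn", "Glut", "Ernte", "Wein", "Reif", "Nebel", "Dunkel"]
--     cum = 0
--     for i, mlen in enumerate([31,28,31,30,31,30,31,31,30,31,30,31]):
--         if doy <= cum + mlen:
--             return f"{doy - cum}.{months[i]}"
--         cum += mlen
--     return "?"
-- ===== SOURCE B (Python) =====
-- def doy_to_label(doy):
--     months = ["Eis", "Schnee", "Lenz", "Saat", "Bluet", "Sonn", "Glut", "Ernte", "Wein", "Reif", "Nebel", "Dunkel"]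
--     bounds = [31, 59, 90, 120, 151, 181, 212, 243, 273, 304, 334, 365]
--     lo, hi = 0, 12
--     while lo < hi:  # binary search: first index with bounds[i] >= doy
--         mid = (lo + hi) // 2
--         if bounds[mid] < doy:
--             lo = mid + 1
--         else:
--             hi = mid
--     if lo == 12:
--         return "?"
--     prev = bounds[lo - 1] if lo > 0 else 0
--     return f"{doy - prev}.{months[lo]}"
-- ===== Notes on version B (the rewrite author's own statement) =====
-- stated objective: alternative
-- what changed: Replaces A's linear scan with a running cumulative sum by a binary search (bisect_left-style while loop) over a precomputed list of cumulative month-end boundaries.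
import Mathlib
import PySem

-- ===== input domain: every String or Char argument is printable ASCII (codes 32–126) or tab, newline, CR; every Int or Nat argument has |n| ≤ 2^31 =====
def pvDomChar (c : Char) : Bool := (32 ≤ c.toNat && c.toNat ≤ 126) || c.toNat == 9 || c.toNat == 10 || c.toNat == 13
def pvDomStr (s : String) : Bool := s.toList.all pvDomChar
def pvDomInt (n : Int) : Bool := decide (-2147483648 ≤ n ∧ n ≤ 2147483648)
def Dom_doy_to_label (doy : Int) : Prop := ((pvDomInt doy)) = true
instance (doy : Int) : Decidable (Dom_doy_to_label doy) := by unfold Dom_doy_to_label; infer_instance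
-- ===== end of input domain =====

-- B replaces A's linear accumulating scan over month lengths by a binary search on
-- precomputed cumulative month-end boundaries (objective: alternative/idiomatic).

-- ===== PORT A =====
def monthsA : List String := ["Eis", "Schnee", "Lenz", "Saat", "Bluet", "Sonn", "Glut", "Ernte", "Wein", "Reif", "Nebel", "Dunkel"]

-- the enumerate loop with running cum; months[i] is always in range (i < 12), so getD is exact
def doyLoopA (doy : Int) (cum : Int) (i : Nat) : List Int → String
  | [] => "?"
  | mlen :: rest =>
    if doy ≤ cum + mlen then PySem.Int.toStr (doy - cum) ++ "." ++ monthsA.getD i ""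
    else doyLoopA doy (cum + mlen) (i + 1) rest

def doy_to_label (doy : Int) : String :=
  doyLoopA doy 0 0 [31,28,31,30,31,30,31,31,30,31,30,31]

-- ===== PORT B =====
def monthsB : List String := ["Eis", "Schnee", "Lenz", "Saat", "Bluet", "Sonn", "Glut", "Ernte", "Wein", "Reif", "Nebel", "Dunkel"]

def boundsB : List Int := [31, 59, 90, 120, 151, 181, 212, 243, 273, 304, 334, 365]

-- Source B's while-loop binary search (bounds[mid] is always in range, so getD is exact)
def bisectLoopB (doy : Int) (lo hi : Nat) : Nat :=
  if lo < hi then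
    let mid := (lo + hi) / 2
    if boundsB.getD mid 0 < doy then bisectLoopB doy (mid + 1) hi
    else bisectLoopB doy lo mid
  else lo
termination_by hi - lo
decreasing_by all_goals omega

def doy_to_label_alt (doy : Int) : String :=
  let lo := bisectLoopB doy 0 12
  if lo = 12 then "?"
  else
    let prev := if lo > 0 then boundsB.getD (lo - 1) 0 else 0
    PySem.Int.toStr (doy - prev) ++ "." ++ monthsB.getD lo ""

-- ===== PRECONDITION & SPEC =====
def Spec_doy_to_label (doy : Int) (out : String) : Prop := out = doy_to_label_alt doy
instance (doy : Int) (out : String) : Decidable (Spec_doy_to_label doy out) := by unfold Spec_doy_to_label; infer_instance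

-- ===== CLAIM (what is proved, stated in full; the proofs are below) =====
def Claim_equal_doy_to_label : Prop := ∀ (doy : Int), Dom_doy_to_label doy → Spec_doy_to_label doy (doy_to_label doy)

-- ===== LEMMAS AND PROOFS =====
theorem bl_0 (doy : Int) (hhi : doy ≤ (31:Int)) : bisectLoopB doy 0 12 = 0 := by
  rw [bisectLoopB]
  norm_num [boundsB, show ¬((212:Int) < doy) from by omega]
  rw [bisectLoopB]
  norm_num [boundsB, show ¬((120:Int) < doy) from by omega]
  rw [bisectLoopB]
  norm_num [boundsB, show ¬((59:Int) < doy) from by omega]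
  rw [bisectLoopB]
  norm_num [boundsB, show ¬((31:Int) < doy) from by omega]
  rw [bisectLoopB]
  norm_num

theorem bl_1 (doy : Int) (hlo : (31:Int) < doy) (hhi : doy ≤ (59:Int)) : bisectLoopB doy 0 12 = 1 := by
  rw [bisectLoopB]
  norm_num [boundsB, show ¬((212:Int) < doy) from by omega]
  rw [bisectLoopB]
  norm_num [boundsB, show ¬((120:Int) < doy) from by omega]
  rw [bisectLoopB]
  norm_num [boundsB, show ¬((59:Int) < doy) from by omega]
  rw [bisectLoopB]
  norm_num [boundsB, show (31:Int) < doy from by omega]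
  rw [bisectLoopB]
  norm_num

theorem bl_2 (doy : Int) (hlo : (59:Int) < doy) (hhi : doy ≤ (90:Int)) : bisectLoopB doy 0 12 = 2 := by
  rw [bisectLoopB]
  norm_num [boundsB, show ¬((212:Int) < doy) from by omega]
  rw [bisectLoopB]
  norm_num [boundsB, show ¬((120:Int) < doy) from by omega]
  rw [bisectLoopB]
  norm_num [boundsB, show (59:Int) < doy from by omega]
  rw [bisectLoopB]
  norm_num [boundsB, show ¬((90:Int) < doy) from by omega]
  rw [bisectLoopB]
  norm_num

theorem bl_3 (doy : Int) (hlo : (90:Int) < doy) (hhi : doy ≤ (120:Int)) : bisectLoopB doy 0 12 = 3 := by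
  rw [bisectLoopB]
  norm_num [boundsB, show ¬((212:Int) < doy) from by omega]
  rw [bisectLoopB]
  norm_num [boundsB, show ¬((120:Int) < doy) from by omega]
  rw [bisectLoopB]
  norm_num [boundsB, show (59:Int) < doy from by omega]
  rw [bisectLoopB]
  norm_num [boundsB, show (90:Int) < doy from by omega]
  rw [bisectLoopB]
  norm_num

theorem bl_4 (doy : Int) (hlo : (120:Int) < doy) (hhi : doy ≤ (151:Int)) : bisectLoopB doy 0 12 = 4 := by
  rw [bisectLoopB]
  norm_num [boundsB, show ¬((212:Int) < doy) from by omega]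
  rw [bisectLoopB]
  norm_num [boundsB, show (120:Int) < doy from by omega]
  rw [bisectLoopB]
  norm_num [boundsB, show ¬((181:Int) < doy) from by omega]
  rw [bisectLoopB]
  norm_num [boundsB, show ¬((151:Int) < doy) from by omega]
  rw [bisectLoopB]
  norm_num

theorem bl_5 (doy : Int) (hlo : (151:Int) < doy) (hhi : doy ≤ (181:Int)) : bisectLoopB doy 0 12 = 5 := by
  rw [bisectLoopB]
  norm_num [boundsB, show ¬((212:Int) < doy) from by omega]
  rw [bisectLoopB]
  norm_num [boundsB, show (120:Int) < doy from by omega]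
  rw [bisectLoopB]
  norm_num [boundsB, show ¬((181:Int) < doy) from by omega]
  rw [bisectLoopB]
  norm_num [boundsB, show (151:Int) < doy from by omega]
  rw [bisectLoopB]
  norm_num

theorem bl_6 (doy : Int) (hlo : (181:Int) < doy) (hhi : doy ≤ (212:Int)) : bisectLoopB doy 0 12 = 6 := by
  rw [bisectLoopB]
  norm_num [boundsB, show ¬((212:Int) < doy) from by omega]
  rw [bisectLoopB]
  norm_num [boundsB, show (120:Int) < doy from by omega]
  rw [bisectLoopB]
  norm_num [boundsB, show (181:Int) < doy from by omega]
  rw [bisectLoopB]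
  norm_num

theorem bl_7 (doy : Int) (hlo : (212:Int) < doy) (hhi : doy ≤ (243:Int)) : bisectLoopB doy 0 12 = 7 := by
  rw [bisectLoopB]
  norm_num [boundsB, show (212:Int) < doy from by omega]
  rw [bisectLoopB]
  norm_num [boundsB, show ¬((304:Int) < doy) from by omega]
  rw [bisectLoopB]
  norm_num [boundsB, show ¬((273:Int) < doy) from by omega]
  rw [bisectLoopB]
  norm_num [boundsB, show ¬((243:Int) < doy) from by omega]
  rw [bisectLoopB]
  norm_num

theorem bl_8 (doy : Int) (hlo : (243:Int) < doy) (hhi : doy ≤ (273:Int)) : bisectLoopB doy 0 12 = 8 := by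
  rw [bisectLoopB]
  norm_num [boundsB, show (212:Int) < doy from by omega]
  rw [bisectLoopB]
  norm_num [boundsB, show ¬((304:Int) < doy) from by omega]
  rw [bisectLoopB]
  norm_num [boundsB, show ¬((273:Int) < doy) from by omega]
  rw [bisectLoopB]
  norm_num [boundsB, show (243:Int) < doy from by omega]
  rw [bisectLoopB]
  norm_num

theorem bl_9 (doy : Int) (hlo : (273:Int) < doy) (hhi : doy ≤ (304:Int)) : bisectLoopB doy 0 12 = 9 := by
  rw [bisectLoopB]
  norm_num [boundsB, show (212:Int) < doy from by omega]
  rw [bisectLoopB]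
  norm_num [boundsB, show ¬((304:Int) < doy) from by omega]
  rw [bisectLoopB]
  norm_num [boundsB, show (273:Int) < doy from by omega]
  rw [bisectLoopB]
  norm_num

theorem bl_10 (doy : Int) (hlo : (304:Int) < doy) (hhi : doy ≤ (334:Int)) : bisectLoopB doy 0 12 = 10 := by
  rw [bisectLoopB]
  norm_num [boundsB, show (212:Int) < doy from by omega]
  rw [bisectLoopB]
  norm_num [boundsB, show (304:Int) < doy from by omega]
  rw [bisectLoopB]
  norm_num [boundsB, show ¬((365:Int) < doy) from by omega]
  rw [bisectLoopB]
  norm_num [boundsB, show ¬((334:Int) < doy) from by omega]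
  rw [bisectLoopB]
  norm_num

theorem bl_11 (doy : Int) (hlo : (334:Int) < doy) (hhi : doy ≤ (365:Int)) : bisectLoopB doy 0 12 = 11 := by
  rw [bisectLoopB]
  norm_num [boundsB, show (212:Int) < doy from by omega]
  rw [bisectLoopB]
  norm_num [boundsB, show (304:Int) < doy from by omega]
  rw [bisectLoopB]
  norm_num [boundsB, show ¬((365:Int) < doy) from by omega]
  rw [bisectLoopB]
  norm_num [boundsB, show (334:Int) < doy from by omega]
  rw [bisectLoopB]
  norm_num

theorem bl_12 (doy : Int) (hlo : (365:Int) < doy) : bisectLoopB doy 0 12 = 12 := by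
  rw [bisectLoopB]
  norm_num [boundsB, show (212:Int) < doy from by omega]
  rw [bisectLoopB]
  norm_num [boundsB, show (304:Int) < doy from by omega]
  rw [bisectLoopB]
  norm_num [boundsB, show (365:Int) < doy from by omega]
  rw [bisectLoopB]
  norm_num

theorem doy_to_label_eq (doy : Int) : doy_to_label doy = doy_to_label_alt doy := by
  by_cases h0 : doy ≤ 31
  · rw [doy_to_label_alt, bl_0 doy (by omega)]
    norm_num [boundsB, monthsB]
    simp only [doy_to_label, doyLoopA, monthsA, List.getD, show doy ≤ (0:Int) + 31 from by omega]
    try norm_num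
    try first | rfl | omega | (intros; first | rfl | omega)
  by_cases h1 : doy ≤ 59
  · rw [doy_to_label_alt, bl_1 doy (by omega) (by omega)]
    norm_num [boundsB, monthsB]
    simp only [doy_to_label, doyLoopA, monthsA, List.getD, show ¬(doy ≤ (0:Int) + 31) from by omega, show doy ≤ (0:Int) + 31 + 28 from by omega]
    try norm_num
    try first | rfl | omega | (intros; first | rfl | omega)
  by_cases h2 : doy ≤ 90
  · rw [doy_to_label_alt, bl_2 doy (by omega) (by omega)]
    norm_num [boundsB, monthsB]
    simp only [doy_to_label, doyLoopA, monthsA, List.getD, show ¬(doy ≤ (0:Int) + 31) from by omega, show ¬(doy ≤ (0:Int) + 31 + 28) from by omega, show doy ≤ (0:Int) + 31 + 28 + 31 from by omega]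
    try norm_num
    try first | rfl | omega | (intros; first | rfl | omega)
  by_cases h3 : doy ≤ 120
  · rw [doy_to_label_alt, bl_3 doy (by omega) (by omega)]
    norm_num [boundsB, monthsB]
    simp only [doy_to_label, doyLoopA, monthsA, List.getD, show ¬(doy ≤ (0:Int) + 31) from by omega, show ¬(doy ≤ (0:Int) + 31 + 28) from by omega, show ¬(doy ≤ (0:Int) + 31 + 28 + 31) from by omega, show doy ≤ (0:Int) + 31 + 28 + 31 + 30 from by omega]
    try norm_num
    try first | rfl | omega | (intros; first | rfl | omega)
  by_cases h4 : doy ≤ 151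
  · rw [doy_to_label_alt, bl_4 doy (by omega) (by omega)]
    norm_num [boundsB, monthsB]
    simp only [doy_to_label, doyLoopA, monthsA, List.getD, show ¬(doy ≤ (0:Int) + 31) from by omega, show ¬(doy ≤ (0:Int) + 31 + 28) from by omega, show ¬(doy ≤ (0:Int) + 31 + 28 + 31) from by omega, show ¬(doy ≤ (0:Int) + 31 + 28 + 31 + 30) from by omega, show doy ≤ (0:Int) + 31 + 28 + 31 + 30 + 31 from by omega]
    try norm_num
    try first | rfl | omega | (intros; first | rfl | omega)
  by_cases h5 : doy ≤ 181
  · rw [doy_to_label_alt, bl_5 doy (by omega) (by omega)]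
    norm_num [boundsB, monthsB]
    simp only [doy_to_label, doyLoopA, monthsA, List.getD, show ¬(doy ≤ (0:Int) + 31) from by omega, show ¬(doy ≤ (0:Int) + 31 + 28) from by omega, show ¬(doy ≤ (0:Int) + 31 + 28 + 31) from by omega, show ¬(doy ≤ (0:Int) + 31 + 28 + 31 + 30) from by omega, show ¬(doy ≤ (0:Int) + 31 + 28 + 31 + 30 + 31) from by omega, show doy ≤ (0:Int) + 31 + 28 + 31 + 30 + 31 + 30 from by omega]
    try norm_num
    try first | rfl | omega | (intros; first | rfl | omega)
  by_cases h6 : doy ≤ 212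
  · rw [doy_to_label_alt, bl_6 doy (by omega) (by omega)]
    norm_num [boundsB, monthsB]
    simp only [doy_to_label, doyLoopA, monthsA, List.getD, show ¬(doy ≤ (0:Int) + 31) from by omega, show ¬(doy ≤ (0:Int) + 31 + 28) from by omega, show ¬(doy ≤ (0:Int) + 31 + 28 + 31) from by omega, show ¬(doy ≤ (0:Int) + 31 + 28 + 31 + 30) from by omega, show ¬(doy ≤ (0:Int) + 31 + 28 + 31 + 30 + 31) from by omega, show ¬(doy ≤ (0:Int) + 31 + 28 + 31 + 30 + 31 + 30) from by omega, show doy ≤ (0:Int) + 31 + 28 + 31 + 30 + 31 + 30 + 31 from by omega]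
    try norm_num
    try first | rfl | omega | (intros; first | rfl | omega)
  by_cases h7 : doy ≤ 243
  · rw [doy_to_label_alt, bl_7 doy (by omega) (by omega)]
    norm_num [boundsB, monthsB]
    simp only [doy_to_label, doyLoopA, monthsA, List.getD, show ¬(doy ≤ (0:Int) + 31) from by omega, show ¬(doy ≤ (0:Int) + 31 + 28) from by omega, show ¬(doy ≤ (0:Int) + 31 + 28 + 31) from by omega, show ¬(doy ≤ (0:Int) + 31 + 28 + 31 + 30) from by omega, show ¬(doy ≤ (0:Int) + 31 + 28 + 31 + 30 + 31) from by omega, show ¬(doy ≤ (0:Int) + 31 + 28 + 31 + 30 + 31 + 30) from by omega, show ¬(doy ≤ (0:Int) + 31 + 28 + 31 + 30 + 31 + 30 + 31) from by omega, show doy ≤ (0:Int) + 31 + 28 + 31 + 30 + 31 + 30 + 31 + 31 from by omega]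
    try norm_num
    try first | rfl | omega | (intros; first | rfl | omega)
  by_cases h8 : doy ≤ 273
  · rw [doy_to_label_alt, bl_8 doy (by omega) (by omega)]
    norm_num [boundsB, monthsB]
    simp only [doy_to_label, doyLoopA, monthsA, List.getD, show ¬(doy ≤ (0:Int) + 31) from by omega, show ¬(doy ≤ (0:Int) + 31 + 28) from by omega, show ¬(doy ≤ (0:Int) + 31 + 28 + 31) from by omega, show ¬(doy ≤ (0:Int) + 31 + 28 + 31 + 30) from by omega, show ¬(doy ≤ (0:Int) + 31 + 28 + 31 + 30 + 31) from by omega, show ¬(doy ≤ (0:Int) + 31 + 28 + 31 + 30 + 31 + 30) from by omega, show ¬(doy ≤ (0:Int) + 31 + 28 + 31 + 30 + 31 + 30 + 31) from by omega, show ¬(doy ≤ (0:Int) + 31 + 28 + 31 + 30 + 31 + 30 + 31 + 31) from by omega, show doy ≤ (0:Int) + 31 + 28 + 31 + 30 + 31 + 30 + 31 + 31 + 30 from by omega]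
    try norm_num
    try first | rfl | omega | (intros; first | rfl | omega)
  by_cases h9 : doy ≤ 304
  · rw [doy_to_label_alt, bl_9 doy (by omega) (by omega)]
    norm_num [boundsB, monthsB]
    simp only [doy_to_label, doyLoopA, monthsA, List.getD, show ¬(doy ≤ (0:Int) + 31) from by omega, show ¬(doy ≤ (0:Int) + 31 + 28) from by omega, show ¬(doy ≤ (0:Int) + 31 + 28 + 31) from by omega, show ¬(doy ≤ (0:Int) + 31 + 28 + 31 + 30) from by omega, show ¬(doy ≤ (0:Int) + 31 + 28 + 31 + 30 + 31) from by omega, show ¬(doy ≤ (0:Int) + 31 + 28 + 31 + 30 + 31 + 30) from by omega, show ¬(doy ≤ (0:Int) + 31 + 28 + 31 + 30 + 31 + 30 + 31) from by omega, show ¬(doy ≤ (0:Int) + 31 + 28 + 31 + 30 + 31 + 30 + 31 + 31) from by omega, show ¬(doy ≤ (0:Int) + 31 + 28 + 31 + 30 + 31 + 30 + 31 + 31 + 30) from by omega, show doy ≤ (0:Int) + 31 + 28 + 31 + 30 + 31 + 30 + 31 + 31 + 30 + 31 from by omega]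
    try norm_num
    try first | rfl | omega | (intros; first | rfl | omega)
  by_cases h10 : doy ≤ 334
  · rw [doy_to_label_alt, bl_10 doy (by omega) (by omega)]
    norm_num [boundsB, monthsB]
    simp only [doy_to_label, doyLoopA, monthsA, List.getD, show ¬(doy ≤ (0:Int) + 31) from by omega, show ¬(doy ≤ (0:Int) + 31 + 28) from by omega, show ¬(doy ≤ (0:Int) + 31 + 28 + 31) from by omega, show ¬(doy ≤ (0:Int) + 31 + 28 + 31 + 30) from by omega, show ¬(doy ≤ (0:Int) + 31 + 28 + 31 + 30 + 31) from by omega, show ¬(doy ≤ (0:Int) + 31 + 28 + 31 + 30 + 31 + 30) from by omega, show ¬(doy ≤ (0:Int) + 31 + 28 + 31 + 30 + 31 + 30 + 31) from by omega, show ¬(doy ≤ (0:Int) + 31 + 28 + 31 + 30 + 31 + 30 + 31 + 31) from by omega, show ¬(doy ≤ (0:Int) + 31 + 28 + 31 + 30 + 31 + 30 + 31 + 31 + 30) from by omega, show ¬(doy ≤ (0:Int) + 31 + 28 + 31 + 30 + 31 + 30 + 31 + 31 + 30 + 31) from by omega, show doy ≤ (0:Int) + 31 + 28 + 31 + 30 +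 31 + 30 + 31 + 31 + 30 + 31 + 30 from by omega]
    try norm_num
    try first | rfl | omega | (intros; first | rfl | omega)
  by_cases h11 : doy ≤ 365
  · rw [doy_to_label_alt, bl_11 doy (by omega) (by omega)]
    norm_num [boundsB, monthsB]
    simp only [doy_to_label, doyLoopA, monthsA, List.getD, show ¬(doy ≤ (0:Int) + 31) from by omega, show ¬(doy ≤ (0:Int) + 31 + 28) from by omega, show ¬(doy ≤ (0:Int) + 31 + 28 + 31) from by omega, show ¬(doy ≤ (0:Int) + 31 + 28 + 31 + 30) from by omega, show ¬(doy ≤ (0:Int) + 31 + 28 + 31 + 30 + 31) from by omega, show ¬(doy ≤ (0:Int) + 31 + 28 + 31 + 30 + 31 + 30) from by omega, show ¬(doy ≤ (0:Int) + 31 + 28 + 31 + 30 + 31 + 30 + 31) from by omega, show ¬(doy ≤ (0:Int) + 31 + 28 + 31 + 30 + 31 + 30 + 31 + 31) from by omega, show ¬(doy ≤ (0:Int) + 31 + 28 + 31 + 30 + 31 + 30 + 31 + 31 + 30) from by omega, show ¬(doy ≤ (0:Int) + 31 + 28 + 31 + 30 + 31 + 30 + 31 + 31 + 30 + 31) from by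 omega, show ¬(doy ≤ (0:Int) + 31 + 28 + 31 + 30 + 31 + 30 + 31 + 31 + 30 + 31 + 30) from by omega, show doy ≤ (0:Int) + 31 + 28 + 31 + 30 + 31 + 30 + 31 + 31 + 30 + 31 + 30 + 31 from by omega]
    try norm_num
    try first | rfl | omega | (intros; first | rfl | omega)
  · rw [doy_to_label_alt, bl_12 doy (by omega)]
    simp only [doy_to_label, doyLoopA, monthsA, List.getD, show ¬(doy ≤ (0:Int) + 31) from by omega, show ¬(doy ≤ (0:Int) + 31 + 28) from by omega, show ¬(doy ≤ (0:Int) + 31 + 28 + 31) from by omega, show ¬(doy ≤ (0:Int) + 31 + 28 + 31 + 30) from by omega, show ¬(doy ≤ (0:Int) + 31 + 28 + 31 + 30 + 31) from by omega, show ¬(doy ≤ (0:Int) + 31 + 28 + 31 + 30 + 31 + 30) from by omega, show ¬(doy ≤ (0:Int) + 31 + 28 + 31 + 30 + 31 + 30 + 31) from by omega, show ¬(doy ≤ (0:Int) + 31 + 28 + 31 + 30 + 31 + 30 + 31 + 31) from by omega, show ¬(doy ≤ (0:Int) + 31 + 28 + 31 + 30 + 31 + 30 + 31 + 31 + 30)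 from by omega, show ¬(doy ≤ (0:Int) + 31 + 28 + 31 + 30 + 31 + 30 + 31 + 31 + 30 + 31) from by omega, show ¬(doy ≤ (0:Int) + 31 + 28 + 31 + 30 + 31 + 30 + 31 + 31 + 30 + 31 + 30) from by omega, show ¬(doy ≤ (0:Int) + 31 + 28 + 31 + 30 + 31 + 30 + 31 + 31 + 30 + 31 + 30 + 31) from by omega]
    try norm_num
    try first | rfl | omega | (intros; first | rfl | omega)

-- ===== VERDICT (by name: the statement is the Claim_ definition above) =====
theorem doy_to_label_spec : Claim_equal_doy_to_label := by
  intro doy _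
  unfold Spec_doy_to_label
  exact doy_to_label_eq doy
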